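-- pv_equiv track=rewrite | github.com/Ehsan-Tavan/Explainable_Detection_of_Online_Sexism | src/utils/graph_utils.py | build_word_doc_edges
-- ===== SOURCE A (Python) =====
-- from typing import List
-- from collections import defaultdict
--
-- def build_word_doc_edges(docs: List[str]) -> [defaultdict, dict]:
--     """
--
--     Args:
--         docs:
--
--     Returns:
--
--     """
--     words_in_docs = defaultdict(set)
--     for i, doc in enumerate(docs):
--         words = doc.split()
--         for word in words:
--             words_in_docs[word].add(i)
--
--     word_doc_freq = {}
--     for word, doc_ids in words_in_docs.items():
--         word_doc_freq[word] = len(doc_ids)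
--     return words_in_docs, word_doc_freq
-- ===== SOURCE B (Python) =====
-- from typing import List
--
--
-- def build_word_doc_edges(docs: List[str]) -> [dict, dict]:
--     # Transposed algorithm: tokenize once, extract the vocabulary in
--     # first-occurrence order, then compute each word's posting set by a
--     # per-word scan over the per-doc token sets (word-major instead of
--     # A's doc-major incremental pass).
--     toks = [doc.split() for doc in docs]
--     vocab = dict.fromkeys(w for t in toks for w in t)
--     tsets = [set(t) for t in toks]
--     words_in_docs = {w: {i for i, ts in enumerate(tsets) if w in ts} for w in vocab}
--     word_doc_freq = {w: len(s) for w, s in words_in_docs.items()}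
--     return words_in_docs, word_doc_freq
-- ===== Notes on version B (the rewrite author's own statement) =====
-- stated objective: alternative
-- what changed: B inverts the loop structure: instead of A's doc-major single pass that grows per-word sets incrementally (plus a second counting loop), B tokenizes once, extracts the vocabulary in first-occurrence order, builds per-doc token sets, and computes each word's posting set by a word-major scan over those sets, deriving frequencies from the finished sets.
import Mathlib
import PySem

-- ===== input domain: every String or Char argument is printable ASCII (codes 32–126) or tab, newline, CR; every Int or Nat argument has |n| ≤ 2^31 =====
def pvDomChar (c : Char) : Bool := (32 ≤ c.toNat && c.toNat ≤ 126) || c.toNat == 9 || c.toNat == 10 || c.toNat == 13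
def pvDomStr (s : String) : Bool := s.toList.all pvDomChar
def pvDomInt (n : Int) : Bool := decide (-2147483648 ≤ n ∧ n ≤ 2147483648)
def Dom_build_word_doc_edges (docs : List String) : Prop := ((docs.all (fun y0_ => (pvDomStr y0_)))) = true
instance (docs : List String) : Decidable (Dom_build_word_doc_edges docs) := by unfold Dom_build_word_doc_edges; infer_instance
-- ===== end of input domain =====

-- B inverts the loop structure: it tokenizes once, takes the vocabulary in first-occurrence
-- order, and builds each word's posting set by a word-major scan over the per-doc token
-- sets, instead of A's doc-major pass that grows per-word sets incrementally (objective: alternative).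


-- ===== PORT A =====
def build_word_doc_edges (docs : List String) : (List (String × List Int)) × (List (String × Int)) :=
  let words_in_docs : PySem.Dict String (PySem.Set Int) :=
    (PySem.List.enumerate docs).foldl
      (fun d p =>
        (PySem.Str.split₀ p.2).foldl
          (fun d word => d.modify word [] (fun s => PySem.Set.add s p.1)) d)
      PySem.Dict.empty
  let word_doc_freq : PySem.Dict String Int :=
    words_in_docs.items.foldl (fun f p => f.insert p.1 ((p.2.length : Int))) PySem.Dict.empty
  (words_in_docs.items, word_doc_freq.items)

-- ===== PORT B =====
def build_word_doc_edges_alt (docs : List String) : (List (String × List Int)) × (List (String × Int)) :=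
  let toks := docs.map PySem.Str.split₀
  let vocab : List String := PySem.List.dedup toks.flatten
  let tsets : List (PySem.Set String) := toks.map PySem.Set.ofList
  let words_in_docs : PySem.Dict String (PySem.Set Int) :=
    vocab.foldl
      (fun d w => d.insert w
        (PySem.Set.ofList (((PySem.List.enumerate tsets).filter (fun p => decide (w ∈ p.2))).map (·.1))))
      PySem.Dict.empty
  let word_doc_freq : PySem.Dict String Int :=
    words_in_docs.items.foldl (fun f q => f.insert q.1 ((q.2.length : Int))) PySem.Dict.empty
  (words_in_docs.items, word_doc_freq.items)

-- ===== PRECONDITION & SPEC =====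
def Spec_build_word_doc_edges (docs : List String) (out : (List (String × List Int)) × (List (String × Int))) : Prop := out = build_word_doc_edges_alt docs
instance (docs : List String) (out : (List (String × List Int)) × (List (String × Int))) : Decidable (Spec_build_word_doc_edges docs out) := by unfold Spec_build_word_doc_edges; infer_instance

-- ===== CLAIM (what is proved, stated in full; the proofs are below) =====
def Claim_equal_build_word_doc_edges : Prop := ∀ (docs : List String), Dom_build_word_doc_edges docs → Spec_build_word_doc_edges docs (build_word_doc_edges docs)

-- ===== LEMMAS AND PROOFS =====

-- enumerate commutes with map (proved here; PySem states no such lemma)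
lemma enumerate_map {α β : Type} (f : α → β) (xs : List α) (s : Int) :
    PySem.List.enumerate (xs.map f) s = (PySem.List.enumerate xs s).map (fun p => (p.1, f p.2)) := by
  induction xs generalizing s with
  | nil => simp [PySem.List.enumerate_nil]
  | cons x xs ih => simp [PySem.List.enumerate_cons, ih]

-- inner loop of A (one doc, index i): the set stored at w gains i exactly if w occurs in the doc
lemma innerA_getD (ws : List String) (i : Int) (d : PySem.Dict String (PySem.Set Int)) (w : String) :
    (ws.foldl (fun d w' => d.modify w' [] (fun s => PySem.Set.add s i)) d).getD w [] =
      if w ∈ ws then PySem.Set.add (d.getD w []) i else d.getD w [] := by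
  induction ws generalizing d with
  | nil => simp
  | cons w' ws ih =>
    simp only [List.foldl_cons, ih]
    by_cases hw : w' = w
    · subst hw
      rw [PySem.Dict.getD_modify_self]
      simp
    · rw [PySem.Dict.getD_modify_of_ne _ _ _ (Ne.symm hw)]
      have hne : w ≠ w' := fun h => hw h.symm
      simp [List.mem_cons, hne]

-- outer loop of A over the enumerated (tokenized) docs: the set at w lists, in order,
-- exactly the fresh indices of docs containing w
lemma outerA_getD (l : List (Int × List String)) (d : PySem.Dict String (PySem.Set Int)) (w : String)
    (hfresh : ∀ p ∈ l, p.1 ∉ d.getD w []) (hne : l.Pairwise (fun p q => p.1 ≠ q.1)) :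
    (l.foldl (fun d p => p.2.foldl (fun d w' => d.modify w' [] (fun s => PySem.Set.add s p.1)) d) d).getD w [] =
      d.getD w [] ++ (l.filter (fun p => decide (w ∈ p.2))).map (·.1) := by
  induction l generalizing d with
  | nil => simp
  | cons p l ih =>
    simp only [List.foldl_cons, List.filter_cons]
    have hpf : p.1 ∉ d.getD w [] := hfresh p (List.mem_cons_self ..)
    have hstep : (p.2.foldl (fun d w' => d.modify w' [] (fun s => PySem.Set.add s p.1)) d).getD w [] =
        d.getD w [] ++ (if w ∈ p.2 then [p.1] else []) := by
      rw [innerA_getD]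
      split_ifs with h
      · exact PySem.Set.add_of_not_mem hpf
      · simp
    rw [ih _ ?_ (List.Pairwise.sublist (List.sublist_cons_self p l) hne)]
    · rw [hstep]
      by_cases h : w ∈ p.2 <;> simp [h]
    · intro q hq
      rw [hstep]
      have h1 : q.1 ∉ d.getD w [] := hfresh q (List.mem_cons_of_mem _ hq)
      have h2 : q.1 ≠ p.1 := fun h => (List.pairwise_cons.mp hne).1 q hq h.symm
      split_ifs with h <;> simp_all

-- keys of A's nested fold = the flattened token stream, deduplicated in first-occurrence order
lemma keysA (l : List (Int × List String)) (d : PySem.Dict String (PySem.Set Int)) :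
    (l.foldl (fun d p => p.2.foldl (fun d w' => d.modify w' [] (fun s => PySem.Set.add s p.1)) d) d).keys =
      (l.flatMap (·.2)).foldl PySem.Set.add d.keys := by
  induction l generalizing d with
  | nil => simp
  | cons p l ih =>
    simp only [List.foldl_cons, List.flatMap_cons, List.foldl_append, ih]
    congr 1
    exact PySem.Dict.keys_foldl_modify p.2 [] (fun _ _ v => PySem.Set.add v p.1) d

-- A's dict has nodup keys throughout
lemma nodupA (l : List (Int × List String)) (d : PySem.Dict String (PySem.Set Int))
    (h : d.keys.Nodup) :
    (l.foldl (fun d p => p.2.foldl (fun d w' => d.modify w' [] (fun s => PySem.Set.add s p.1)) d) d).keys.Nodup := by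
  induction l generalizing d with
  | nil => exact h
  | cons p l ih =>
    simp only [List.foldl_cons]
    exact ih _ (PySem.Dict.nodup_keys_foldl_modify_key p.2 (fun x => x) [] (fun _ _ v => PySem.Set.add v p.1) d h)

-- the filtered index list is duplicate-free (indices of an enumeration are pairwise distinct)
lemma ids_nodup (l : List (Int × List String)) (hne : l.Pairwise (fun p q => p.1 ≠ q.1)) (w : String) :
    ((l.filter (fun p => decide (w ∈ p.2))).map (·.1)).Nodup := by
  rw [List.Nodup, List.pairwise_map]
  exact List.Pairwise.filter _ hne

-- the two dicts of doc-sets have the same items list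
lemma dicts_eq (docs : List String) :
    ((PySem.List.enumerate docs).foldl
      (fun d p => (PySem.Str.split₀ p.2).foldl
        (fun d word => d.modify word [] (fun s => PySem.Set.add s p.1)) d)
      PySem.Dict.empty).items =
    ((PySem.List.dedup (docs.map PySem.Str.split₀).flatten).foldl
      (fun d w => d.insert w
        (PySem.Set.ofList (((PySem.List.enumerate ((docs.map PySem.Str.split₀).map PySem.Set.ofList)).filter
          (fun p => decide (w ∈ p.2))).map (·.1))))
      PySem.Dict.empty).items := by
  have hsets : ∀ w : String,
      ((PySem.List.enumerate ((docs.map PySem.Str.split₀).map PySem.Set.ofList)).filter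
        (fun p => decide (w ∈ p.2))).map (·.1) =
      ((PySem.List.enumerate (docs.map PySem.Str.split₀)).filter
        (fun p => decide (w ∈ p.2))).map (·.1) := by
    intro w
    simp only [enumerate_map, List.filter_map, List.map_map, Function.comp_def,
      PySem.Set.mem_ofList]
  have hl :
      (PySem.List.enumerate docs).map (fun p => (p.1, PySem.Str.split₀ p.2)) =
        PySem.List.enumerate (docs.map PySem.Str.split₀) 0 :=
    (enumerate_map PySem.Str.split₀ docs 0).symm
  set l : List (Int × List String) :=
    (PySem.List.enumerate docs).map (fun p => (p.1, PySem.Str.split₀ p.2)) with hldef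
  have hne : l.Pairwise (fun p q => p.1 ≠ q.1) := by
    rw [hldef, List.pairwise_map]
    exact (PySem.List.pairwise_lt_enumerate docs 0).imp (fun h => ne_of_lt h)
  have hflat : l.flatMap (·.2) = (docs.map PySem.Str.split₀).flatten := by
    rw [hldef, List.flatten_eq_flatMap, List.flatMap_map, List.flatMap_map]
    conv_rhs => rw [← PySem.List.map_snd_enumerate docs 0, List.flatMap_map]
    rfl
  -- A's fold rewritten as a fold over the pre-tokenized enumeration l
  have hfoldA :
      (PySem.List.enumerate docs).foldl
        (fun d p => (PySem.Str.split₀ p.2).foldl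
          (fun d word => d.modify word [] (fun s => PySem.Set.add s p.1)) d)
        PySem.Dict.empty =
      l.foldl (fun d p => p.2.foldl
          (fun d w' => d.modify w' [] (fun s => PySem.Set.add s p.1)) d)
        PySem.Dict.empty := by
    rw [hldef, List.foldl_map]
  have hnodup := nodupA l PySem.Dict.empty (by simp)
  have hkeys :
      (l.foldl (fun d p => p.2.foldl
          (fun d w' => d.modify w' [] (fun s => PySem.Set.add s p.1)) d)
        PySem.Dict.empty).keys = PySem.Set.ofList (l.flatMap (·.2)) := by
    rw [keysA]
    simp [PySem.Set.ofList_eq_foldl]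
  rw [hfoldA, PySem.Dict.items_eq_map_keys _ hnodup [], hkeys]
  rw [PySem.Dict.items_foldl_insert_fresh _ (fun w => w)
    (fun w => PySem.Set.ofList (((PySem.List.enumerate ((docs.map PySem.Str.split₀).map PySem.Set.ofList)).filter
      (fun p => decide (w ∈ p.2))).map (·.1)))
    PySem.Dict.empty (fun a _ => by simp)
    (by simp)]
  rw [PySem.List.dedup_eq_ofList, ← hflat]
  simp only [show (PySem.Dict.empty : PySem.Dict String (PySem.Set Int)).items = [] from rfl,
    List.nil_append]
  apply List.map_congr_left
  intro w _
  rw [hsets w, ← hl]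
  rw [outerA_getD l PySem.Dict.empty w (by simp) hne]
  rw [PySem.Set.ofList_eq_self_of_nodup _ (ids_nodup l hne w)]
  simp

-- ===== VERDICT (by name: the statement is the Claim_ definition above) =====
theorem build_word_doc_edges_spec : Claim_equal_build_word_doc_edges := by
  intro docs _
  unfold Spec_build_word_doc_edges build_word_doc_edges build_word_doc_edges_alt
  dsimp only
  rw [dicts_eq docs]
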